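-- pv_equiv track=rewrite | github.com/NSPTU-maga/computer-technologies | lr3/build_portrait.py | build_portrait
-- ===== SOURCE A (Python) =====
-- from collections import defaultdict
-- from typing import List, Sequence, Tuple, Callable, Dict
--
-- def build_portrait(n_nodes: int, elements):
--     row_to_cols = defaultdict(set)
--
--     for elem_nodes, _mat in elements:
--         k = len(elem_nodes)
--         for a in range(k):
--             ia = elem_nodes[a]
--             for b in range(a + 1, k):
--                 ib = elem_nodes[b]
--                 if ia == ib:
--                     continue
--                 i_min = min(ia, ib)
--                 i_max = max(ia, ib)
--                 row_to_cols[i_min].add(i_max)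
--
--     ig = [0] * (n_nodes + 1)
--     jg: List[int] = []
--
--     nnz = 0
--     for i in range(n_nodes):
--         cols = row_to_cols.get(i, set())
--         cols_sorted = sorted(cols)
--         nnz += len(cols_sorted)
--         ig[i + 1] = nnz
--         jg.extend(cols_sorted)
--
--     return ig, jg
-- ===== SOURCE B (Python) =====
-- def build_portrait(n_nodes, elements):
--     edge_set = set()
--     for elem_nodes, _mat in elements:
--         k = len(elem_nodes)
--         for a in range(k):
--             ia = elem_nodes[a]
--             for b in range(a + 1, k):
--                 ib = elem_nodes[b]
--                 if ia == ib:
--                     continue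
--                 lo, hi = (ia, ib) if ia < ib else (ib, ia)
--                 if 0 <= lo < n_nodes:
--                     edge_set.add((lo, hi))
--
--     edges = sorted(edge_set)
--     jg = [c for _r, c in edges]
--
--     ig = [0] * (n_nodes + 1)
--     for r, _c in edges:
--         ig[r + 1] += 1
--     for i in range(1, n_nodes + 1):
--         ig[i] += ig[i - 1]
--
--     return ig, jg
-- ===== Notes on version B (the rewrite author's own statement) =====
-- stated objective: alternative
-- what changed: Replaces A's per-row dict-of-sets with per-row sorts and a running nnz counter by one globally sorted deduplicated (row,col) edge list from which jg is read off directly and ig is built by a count-scatter plus a prefix-sum pass (the standard CSR construction).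
import Mathlib
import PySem

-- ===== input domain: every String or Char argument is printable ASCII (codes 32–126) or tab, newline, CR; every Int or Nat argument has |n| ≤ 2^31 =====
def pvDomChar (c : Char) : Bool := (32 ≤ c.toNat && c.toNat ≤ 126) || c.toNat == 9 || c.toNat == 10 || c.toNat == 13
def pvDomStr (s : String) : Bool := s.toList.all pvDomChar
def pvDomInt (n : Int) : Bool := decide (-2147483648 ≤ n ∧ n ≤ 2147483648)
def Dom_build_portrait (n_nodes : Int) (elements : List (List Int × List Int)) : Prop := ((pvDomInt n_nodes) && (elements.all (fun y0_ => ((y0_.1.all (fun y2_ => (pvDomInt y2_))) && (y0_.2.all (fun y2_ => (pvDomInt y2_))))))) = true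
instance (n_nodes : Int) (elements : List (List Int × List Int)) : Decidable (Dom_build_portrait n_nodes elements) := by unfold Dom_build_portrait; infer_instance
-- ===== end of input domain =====

-- B replaces A's dict-of-sets + per-row sorts + running prefix by one globally sorted
-- B replaces A's dict-of-sets + per-row sorting + running prefix counter by one globally
-- sorted deduplicated edge list, a count-scatter into ig and a prefix-sum pass
-- (alternative CSR-portrait construction, same cost class).

-- ===== PORT A =====
-- A-side helpers: the two loops of A as named folds (same computation, step for step)
def pvAdict (elements : List (List Int × List Int)) : PySem.Dict Int (PySem.Set Int) :=
  elements.foldl (fun d el =>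
    let elem_nodes := el.1
    let k : Int := elem_nodes.length
    (PySem.List.pyRange 0 k).foldl (fun d a =>
      let ia := PySem.List.pyGetD elem_nodes a 0   -- a ∈ range(k): index in range, pyGetD exact
      (PySem.List.pyRange (a + 1) k).foldl (fun d b =>
        let ib := PySem.List.pyGetD elem_nodes b 0
        if ia = ib then d
        else
          let i_min := min ia ib
          let i_max := max ia ib
          d.modify i_min [] (fun s => PySem.Set.add s i_max)) d) d)
    PySem.Dict.empty

def pvAstep (row_to_cols : PySem.Dict Int (PySem.Set Int)) (st : List Int × List Int × Int)
    (i : Int) : List Int × List Int × Int :=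
  let cols := row_to_cols.getD i []
  let cols_sorted := PySem.List.sorted cols (fun c => c)
  let nnz := st.2.2 + (cols_sorted.length : Int)
  -- ig[i + 1] = nnz with 0 ≤ i < n_nodes: index i+1 nonnegative and in range, List.set exact
  ((st.1).set (i + 1).toNat nnz, st.2.1 ++ cols_sorted, nnz)

def build_portrait (n_nodes : Int) (elements : List (List Int × List Int)) : List Int × List Int :=
  let row_to_cols := pvAdict elements
  let ig0 : List Int := PySem.List.pyRepeat [0] (n_nodes + 1)
  let st := (PySem.List.pyRange 0 n_nodes).foldl (pvAstep row_to_cols) (ig0, ([] : List Int), (0 : Int))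
  (st.1, st.2.1)

-- ===== PORT B =====
-- B-side helpers: B's edge-collecting double loop and its two ig passes as named folds
def pvBedgeList (n_nodes : Int) (elements : List (List Int × List Int)) : List (Int × Int) :=
  elements.foldl (fun acc el =>
    let elem_nodes := el.1
    let k : Int := elem_nodes.length
    (PySem.List.pyRange 0 k).foldl (fun acc a =>
      let ia := PySem.List.pyGetD elem_nodes a 0
      (PySem.List.pyRange (a + 1) k).foldl (fun acc b =>
        let ib := PySem.List.pyGetD elem_nodes b 0
        if ia = ib then acc
        else
          let lohi := if ia < ib then (ia, ib) else (ib, ia)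
          if 0 ≤ lohi.1 ∧ lohi.1 < n_nodes then acc ++ [lohi] else acc) acc) acc)
    []

-- ig[r + 1] += 1 with 0 ≤ r < n_nodes guaranteed by B's filter: index in range, exact
def pvBscatStep (ig : List Int) (p : Int × Int) : List Int :=
  ig.set (p.1 + 1).toNat (PySem.List.pyGetD ig (p.1 + 1) 0 + 1)

def pvBsumStep (ig : List Int) (i : Int) : List Int :=
  ig.set i.toNat (PySem.List.pyGetD ig i 0 + PySem.List.pyGetD ig (i - 1) 0)

def build_portrait_alt (n_nodes : Int) (elements : List (List Int × List Int)) : List Int × List Int :=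
  let edge_list := pvBedgeList n_nodes elements
  let edges := PySem.List.sorted2 (PySem.Set.ofList edge_list) (fun p => p.1) (fun p => p.2)
  let jg := edges.map (fun p => p.2)
  let ig1 : List Int := PySem.List.pyRepeat [0] (n_nodes + 1)
  let ig2 := edges.foldl pvBscatStep ig1
  let ig3 := (PySem.List.pyRange 1 (n_nodes + 1)).foldl pvBsumStep ig2
  (ig3, jg)

-- ===== PRECONDITION & SPEC =====
def Spec_build_portrait (n_nodes : Int) (elements : List (List Int × List Int)) (out : List Int × List Int) : Prop := out = build_portrait_alt n_nodes elements
instance (n_nodes : Int) (elements : List (List Int × List Int)) (out : List Int × List Int) : Decidable (Spec_build_portrait n_nodes elements out) := by unfold Spec_build_portrait; infer_instance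

-- ===== CLAIM (what is proved, stated in full; the proofs are below) =====
def Claim_equal_build_portrait : Prop := ∀ (n_nodes : Int) (elements : List (List Int × List Int)), Dom_build_portrait n_nodes elements → Spec_build_portrait n_nodes elements (build_portrait n_nodes elements)

-- ===== LEMMAS AND PROOFS =====
def pvStepA (d : PySem.Dict Int (PySem.Set Int)) (p : Int × Int) : PySem.Dict Int (PySem.Set Int) :=
  d.modify p.1 [] (fun s => PySem.Set.add s p.2)

lemma pvDictFold (L : List (Int × Int)) :
    ∀ (d : PySem.Dict Int (PySem.Set Int)), (∀ r, ((d.getD r []).Nodup)) →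
    (∀ r, ((L.foldl pvStepA d).getD r []).Nodup) ∧
    (∀ r c, c ∈ (L.foldl pvStepA d).getD r [] ↔ c ∈ d.getD r [] ∨ (r, c) ∈ L) := by
  induction L with
  | nil => intro d h; exact ⟨h, fun r c => by simp⟩
  | cons p L ih =>
    intro d h
    have h' : ∀ r, (((pvStepA d p).getD r []).Nodup) := by
      intro r
      rw [pvStepA, PySem.Dict.getD_modify]
      split
      · exact PySem.Set.nodup_add _ _ (h _)
      · exact h r
    obtain ⟨ih1, ih2⟩ := ih (pvStepA d p) h'
    refine ⟨ih1, fun r c => ?_⟩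
    rw [List.foldl_cons, ih2]
    rw [pvStepA, PySem.Dict.getD_modify]
    by_cases hr : r = p.1
    · subst hr
      simp [PySem.Set.mem_add]
      constructor
      · rintro (⟨h1 | h2⟩ | h3)
        · exact Or.inl h1
        · exact Or.inr (Or.inl (by rw [h2]))
        · tauto
      · rintro (h1 | (h2 | h3))
        · tauto
        · exact Or.inl (Or.inr (congrArg Prod.snd h2))
        · tauto
    · have hne : (r, c) ≠ p := fun heq => hr (congrArg Prod.fst heq)
      simp [hr, hne]
lemma pvSorted2Lex (xs : List (Int × Int)) :
    PySem.List.sorted2 xs (fun p => p.1) (fun p => p.2)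
    = PySem.List.sorted xs (fun p => toLex p) := by
  rw [PySem.List.sorted2, PySem.List.sorted_eq_foldl_insertBy]
  simp only [if_neg (by decide : ¬(false = true))]
  congr 1
  funext acc x
  congr 1
  funext a b
  rcases lt_trichotomy a.1 b.1 with h | h | h <;>
    simp [Prod.Lex.toLex_lt_toLex, h, lt_asymm]
lemma pvPyRangeMap (a b : Int) :
    PySem.List.pyRange a b = (List.range (b - a).toNat).map (fun t : Nat => a + (t : Int)) := by
  rw [PySem.List.pyRange_of_pos a b one_pos]
  have h1 : (b - a + 1 - 1) / 1 = b - a := by omega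
  split
  · rw [h1]; simp
  · have : (b - a).toNat = 0 := by omega
    simp [this]

def pvPairs (ns : List Int) : List (Int × Int) :=
  (PySem.List.pyRange 0 (ns.length : Int)).flatMap (fun a =>
    (PySem.List.pyRange (a + 1) (ns.length : Int)).filterMap (fun b =>
      if PySem.List.pyGetD ns a 0 = PySem.List.pyGetD ns b 0 then none
      else some (min (PySem.List.pyGetD ns a 0) (PySem.List.pyGetD ns b 0),
                 max (PySem.List.pyGetD ns a 0) (PySem.List.pyGetD ns b 0))))

def pvGen (elements : List (List Int × List Int)) : List (Int × Int) :=
  elements.flatMap (fun el => pvPairs el.1)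

-- both ports' element double-loop is a fold of its step over pvGen
lemma pvFoldNested {σ : Type} (step : σ → Int × Int → σ)
    (elements : List (List Int × List Int)) (init : σ) :
    elements.foldl (fun s el =>
      (PySem.List.pyRange 0 (el.1.length : Int)).foldl (fun s a =>
        (PySem.List.pyRange (a + 1) (el.1.length : Int)).foldl (fun s b =>
          if PySem.List.pyGetD el.1 a 0 = PySem.List.pyGetD el.1 b 0 then s
          else step s (min (PySem.List.pyGetD el.1 a 0) (PySem.List.pyGetD el.1 b 0),
                       max (PySem.List.pyGetD el.1 a 0) (PySem.List.pyGetD el.1 b 0))) s) s) init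
    = (pvGen elements).foldl step init := by
  rw [pvGen, List.foldl_flatMap]
  apply PySem.List.foldl_congr_mem
  intro acc el _
  rw [pvPairs, List.foldl_flatMap]
  apply PySem.List.foldl_congr_mem
  intro acc2 a _
  rw [List.foldl_filterMap]
  apply PySem.List.foldl_congr_mem
  intro acc3 b _
  split <;> rfl

def pvCols (elements : List (List Int × List Int)) (r : Int) : List Int :=
  ((pvGen elements).foldl pvStepA PySem.Dict.empty).getD r []

def pvCS (elements : List (List Int × List Int)) (r : Int) : List Int :=
  PySem.List.sorted (pvCols elements r) (fun c => c)

def pvF (n_nodes : Int) (elements : List (List Int × List Int)) : List (Int × Int) :=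
  (pvGen elements).filter (fun p => decide (0 ≤ p.1 ∧ p.1 < n_nodes))

def pvLcat (n_nodes : Int) (elements : List (List Int × List Int)) : List (Int × Int) :=
  (PySem.List.pyRange 0 n_nodes).flatMap (fun r => (pvCS elements r).map (fun c => (r, c)))

lemma pvColsNodup (elements : List (List Int × List Int)) (r : Int) :
    (pvCols elements r).Nodup :=
  (pvDictFold (pvGen elements) PySem.Dict.empty (by simp [PySem.Dict.getD_empty])).1 r

lemma pvMemCols (elements : List (List Int × List Int)) (r c : Int) :
    c ∈ pvCols elements r ↔ (r, c) ∈ pvGen elements := by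
  rw [pvCols, (pvDictFold (pvGen elements) PySem.Dict.empty (by simp [PySem.Dict.getD_empty])).2 r c]
  simp [PySem.Dict.getD_empty]

lemma pvCSNodup (elements : List (List Int × List Int)) (r : Int) :
    (pvCS elements r).Nodup := by
  rw [pvCS]
  exact (PySem.List.sorted_perm _ _ _).symm.nodup (pvColsNodup elements r)

lemma pvMemCS (elements : List (List Int × List Int)) (r c : Int) :
    c ∈ pvCS elements r ↔ (r, c) ∈ pvGen elements := by
  rw [pvCS, PySem.List.mem_sorted, pvMemCols]

lemma pvCSPairwise (elements : List (List Int × List Int)) (r : Int) :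
    (pvCS elements r).Pairwise (· < ·) := by
  have h1 : (pvCS elements r).Pairwise (· ≤ ·) := PySem.List.sorted_pairwise _ _
  have h2 : (pvCS elements r).Pairwise (· ≠ ·) := pvCSNodup elements r
  exact (h1.and h2).imp (fun h => lt_of_le_of_ne h.1 h.2)

lemma pvLcatPairwise (n_nodes : Int) (elements : List (List Int × List Int)) :
    (pvLcat n_nodes elements).Pairwise (fun p q => toLex p < toLex q) := by
  rw [pvLcat, List.pairwise_flatMap]
  constructor
  · intro r _
    rw [List.pairwise_map]
    apply List.Pairwise.imp ?_ (pvCSPairwise elements r)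
    intro a b h
    exact Prod.Lex.toLex_lt_toLex.mpr (Or.inr ⟨rfl, h⟩)
  · rw [pvPyRangeMap]
    rw [List.pairwise_map]
    apply List.Pairwise.imp ?_ (List.pairwise_lt_range (n := (n_nodes - 0).toNat))
    intro r1 r2 h x hx y hy
    simp only [List.mem_map] at hx hy
    obtain ⟨c1, _, rfl⟩ := hx
    obtain ⟨c2, _, rfl⟩ := hy
    exact Prod.Lex.toLex_lt_toLex.mpr (Or.inl (by omega))

lemma pvLcatNodup (n_nodes : Int) (elements : List (List Int × List Int)) :
    (pvLcat n_nodes elements).Nodup :=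
  (pvLcatPairwise n_nodes elements).imp (fun h => ne_of_apply_ne toLex (ne_of_lt h))

lemma pvMemLcat (n_nodes : Int) (elements : List (List Int × List Int)) (p : Int × Int) :
    p ∈ pvLcat n_nodes elements ↔ p ∈ pvF n_nodes elements := by
  rw [pvLcat, pvF, List.mem_flatMap, List.mem_filter]
  constructor
  · rintro ⟨r, hr, hp⟩
    simp only [List.mem_map] at hp
    obtain ⟨c, hc, rfl⟩ := hp
    rw [pvMemCS] at hc
    refine ⟨hc, ?_⟩
    rw [PySem.List.mem_pyRange_one] at hr
    simp
    omega
  · rintro ⟨hp, hf⟩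
    simp only [decide_eq_true_eq] at hf
    refine ⟨p.1, ?_, ?_⟩
    · rw [PySem.List.mem_pyRange_one]; omega
    · simp only [List.mem_map]
      exact ⟨p.2, (pvMemCS elements p.1 p.2).mpr (by simpa using hp), rfl⟩

lemma pvEdgesEq (n_nodes : Int) (elements : List (List Int × List Int)) :
    PySem.List.sorted2 (PySem.Set.ofList (pvF n_nodes elements)) (fun p => p.1) (fun p => p.2)
    = pvLcat n_nodes elements := by
  rw [pvSorted2Lex]
  apply PySem.List.sorted_eq_of_perm_of_pairwise_lt
  · rw [List.perm_ext_iff_of_nodup (pvLcatNodup n_nodes elements) (PySem.Set.nodup_ofList _)]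
    intro p
    rw [pvMemLcat, PySem.Set.mem_ofList]
  · exact pvLcatPairwise n_nodes elements

def pvC (elements : List (List Int × List Int)) (j : Nat) : Int :=
  ((List.range j).map (fun t : Nat => ((pvCS elements (t : Int)).length : Int))).sum

lemma pvCSucc (elements : List (List Int × List Int)) (m : Nat) :
    pvC elements (m + 1) = pvC elements m + ((pvCS elements (m : Int)).length : Int) := by
  rw [pvC, pvC, List.range_succ, List.map_append, List.sum_append]
  simp

def pvStepA2 (elements : List (List Int × List Int)) (st : List Int × List Int × Int) (i : Int) :
    List Int × List Int × Int :=
  ((st.1).set (i + 1).toNat (st.2.2 + ((pvCS elements i).length : Int)),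
   st.2.1 ++ pvCS elements i,
   st.2.2 + ((pvCS elements i).length : Int))

lemma pvA2 (elements : List (List Int × List Int)) (N : Nat) :
    ∀ m, m ≤ N →
    ((List.range m).map (fun t : Nat => (0 : Int) + t)).foldl (pvStepA2 elements)
        (List.replicate (N + 1) 0, [], 0)
    = ((List.range (N + 1)).map (fun j => if j ≤ m then pvC elements j else 0),
       (List.range m).flatMap (fun t : Nat => pvCS elements (t : Int)),
       pvC elements m) := by
  intro m
  induction m with
  | zero =>
    intro _
    simp only [List.range_zero, List.map_nil, List.foldl_nil, List.flatMap_nil]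
    refine Prod.ext ?_ (Prod.ext (by simp) (by simp [pvC]))
    simp only []
    apply List.ext_getElem (by simp)
    intro j h1 h2
    simp only [List.getElem_replicate, List.getElem_map, List.getElem_range]
    split
    · next h =>
      have hj0 : j = 0 := by omega
      subst hj0
      rw [pvC]
      simp
    · rfl
  | succ m ih =>
    intro hm
    rw [List.range_succ, List.map_append, List.foldl_append]
    rw [ih (by omega)]
    simp only [List.map_cons, List.map_nil, List.foldl_cons, List.foldl_nil]
    rw [pvStepA2]
    simp only []
    have ht : ((0 : Int) + (m : Int) + 1).toNat = m + 1 := by omega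
    refine Prod.ext ?_ (Prod.ext ?_ ?_)
    · simp only [ht]
      apply List.ext_getElem (by simp)
      intro j h1 h2
      rw [List.getElem_set]
      simp only [List.getElem_map, List.getElem_range]
      have hz : (0 : Int) + (m : Int) = (m : Int) := by omega
      split
      · next h =>
        subst h
        rw [if_pos (le_refl (m + 1)), hz, pvCSucc]
      · next h =>
        by_cases hj : j ≤ m
        · rw [if_pos hj, if_pos (by omega)]
        · rw [if_neg hj, if_neg (by omega)]
    · rw [List.range_succ, List.flatMap_append]
      simp
    · simp only []
      rw [pvCSucc]
      norm_num

lemma pvScatter (L : List (Int × Int)) :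
    ∀ (ig : List Int), (∀ p ∈ L, 0 ≤ p.1 ∧ p.1 + 1 < (ig.length : Int)) →
    (L.foldl pvBscatStep ig).length = ig.length ∧
    ∀ j, j < ig.length →
      (L.foldl pvBscatStep ig).getD j 0
        = ig.getD j 0 + (L.countP (fun p => decide (p.1 + 1 = (j : Int))) : Int) := by
  induction L with
  | nil => intro ig _; exact ⟨rfl, by simp⟩
  | cons p L ih =>
    intro ig hb
    have hp := hb p List.mem_cons_self
    have hlen : (pvBscatStep ig p).length = ig.length := by
      rw [pvBscatStep]; simp
    obtain ⟨ih1, ih2⟩ := ih (pvBscatStep ig p)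
      (by intro q hq; rw [hlen]; exact hb q (List.mem_cons_of_mem _ hq))
    constructor
    · rw [List.foldl_cons, ih1, hlen]
    · intro j hj
      rw [List.foldl_cons, ih2 j (by rw [hlen]; exact hj)]
      rw [List.countP_cons]
      have hval : PySem.List.pyGetD ig (p.1 + 1) 0 = ig.getD (p.1 + 1).toNat 0 :=
        PySem.List.pyGetD_of_nonneg ig 0 (by omega)
      rw [pvBscatStep, hval]
      by_cases hc : p.1 + 1 = (j : Int)
      · have hcn : (p.1 + 1).toNat = j := by omega
        rw [List.getD_eq_getElem?_getD, List.getElem?_set, if_pos hcn]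
        rw [if_pos (by omega : (p.1 + 1).toNat < ig.length)]
        simp only [Option.getD_some, hcn]
        rw [if_pos (by simpa using hc)]
        push_cast
        rw [List.getD_eq_getElem?_getD]
        ring
      · have hcn : (p.1 + 1).toNat ≠ j := by omega
        rw [List.getD_eq_getElem?_getD, List.getElem?_set, if_neg hcn]
        rw [if_neg (by simpa using hc)]
        rw [List.getD_eq_getElem?_getD]
        push_cast
        ring

def pvS (v : Nat → Int) (j : Nat) : Int := ((List.range (j + 1)).map v).sum

lemma pvSSucc (v : Nat → Int) (m : Nat) : pvS v (m + 1) = pvS v m + v (m + 1) := by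
  rw [pvS, pvS, List.range_succ, List.map_append, List.sum_append]
  simp

lemma pvPrefix (v : Nat → Int) (N : Nat) :
    ∀ m, m ≤ N →
    ((List.range m).map (fun t : Nat => (1 : Int) + t)).foldl pvBsumStep ((List.range (N + 1)).map v)
    = (List.range (N + 1)).map (fun j => if j ≤ m then pvS v j else v j) := by
  intro m
  induction m with
  | zero =>
    intro _
    simp only [List.range_zero, List.map_nil, List.foldl_nil]
    apply List.ext_getElem (by simp)
    intro j h1 h2
    simp only [List.getElem_map, List.getElem_range]
    split
    · next h =>
      have hj0 : j = 0 := by omega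
      subst hj0
      rw [pvS]
      simp
    · rfl
  | succ m ih =>
    intro hm
    rw [show List.range (m + 1) = List.range m ++ [m] from List.range_succ,
       List.map_append, List.foldl_append, ih (by omega)]
    simp only [List.map_cons, List.map_nil, List.foldl_cons, List.foldl_nil]
    rw [pvBsumStep]
    have hlen : ((List.range (N + 1)).map (fun j => if j ≤ m then pvS v j else v j)).length = N + 1 := by simp
    have ht : ((1 : Int) + (m : Int)).toNat = m + 1 := by omega
    have hga : PySem.List.pyGetD ((List.range (N + 1)).map (fun j => if j ≤ m then pvS v j else v j)) ((1 : Int) + (m : Int)) 0 = v (m + 1) := by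
      rw [PySem.List.pyGetD_eq_getElem _ _ (by omega) (by rw [hlen]; omega)]
      simp only [ht, List.getElem_map, List.getElem_range]
      rw [if_neg (by omega)]
    have hgb : PySem.List.pyGetD ((List.range (N + 1)).map (fun j => if j ≤ m then pvS v j else v j)) ((1 : Int) + (m : Int) - 1) 0 = pvS v m := by
      rw [PySem.List.pyGetD_eq_getElem _ _ (by omega) (by rw [hlen]; omega)]
      have : ((1 : Int) + (m : Int) - 1).toNat = m := by omega
      simp only [this, List.getElem_map, List.getElem_range]
      rw [if_pos (le_refl m)]
    rw [hga, hgb, ht]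
    apply List.ext_getElem (by simp)
    intro j h1 h2
    rw [List.getElem_set]
    simp only [List.getElem_map, List.getElem_range]
    split
    · next h =>
      subst h
      rw [if_pos (le_refl (m + 1)), pvSSucc]
      ring
    · next h =>
      by_cases hj : j ≤ m
      · rw [if_pos hj, if_pos (by omega)]
      · rw [if_neg hj, if_neg (by omega)]

lemma pvDeltaSum {M : Type} [AddCommMonoid M] (t : Nat) (v : Nat → M) :
    ∀ N : Nat, ((List.range N).map (fun s => if s = t then v s else 0)).sum
      = if t < N then v t else 0 := by
  intro N
  induction N with
  | zero => simp
  | succ N ih =>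
    rw [show List.range (N + 1) = List.range N ++ [N] from List.range_succ,
       List.map_append, List.sum_append, ih]
    by_cases h2 : N = t
    · subst h2
      simp
    · by_cases h : t < N
      · simp [h, h2, show t < N + 1 by omega]
      · simp [h, h2, show ¬t < N + 1 by omega]

def pvCnt (n_nodes : Int) (elements : List (List Int × List Int)) (j : Nat) : Int :=
  ((pvLcat n_nodes elements).countP (fun p => decide (p.1 + 1 = (j : Int))) : Int)

lemma pvCnt0 (n_nodes : Int) (elements : List (List Int × List Int)) :
    pvCnt n_nodes elements 0 = 0 := by
  rw [pvCnt, Nat.cast_eq_zero, List.countP_eq_zero]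
  intro p hp
  have hm := (pvMemLcat n_nodes elements p).mp hp
  rw [pvF, List.mem_filter] at hm
  have h2 := hm.2
  simp only [decide_eq_true_eq] at h2 ⊢
  omega

lemma pvCntSucc (n_nodes : Int) (elements : List (List Int × List Int)) (t : Nat)
    (ht : (t : Int) < n_nodes) :
    pvCnt n_nodes elements (t + 1) = ((pvCS elements (t : Int)).length : Int) := by
  rw [pvCnt, pvLcat, List.countP_flatMap, pvPyRangeMap 0 n_nodes, List.map_map]
  rw [List.map_congr_left (g := fun s : Nat => if s = t then (pvCS elements (s : Int)).length else 0) ?_]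
  · rw [pvDeltaSum, if_pos (by omega)]
  · intro s _
    simp only [Function.comp_apply, List.countP_map, zero_add]
    by_cases hs : s = t
    · rw [if_pos hs]
      have h1 : ((fun p : Int × Int => decide (p.1 + 1 = ((t + 1 : Nat) : Int))) ∘ fun c => ((s : Int), c)) = fun _ => true := by
        funext c
        simp only [Function.comp_apply, decide_eq_true_eq]
        subst hs
        push_cast
        omega
      rw [h1, List.countP_true]
    · rw [if_neg hs]
      rw [List.countP_eq_zero]
      intro c _
      simp only [Function.comp_apply, decide_eq_true_eq]
      omega

lemma pvSC (n_nodes : Int) (elements : List (List Int × List Int)) (hn : 0 ≤ n_nodes) :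
    ∀ j, j ≤ n_nodes.toNat → pvS (pvCnt n_nodes elements) j = pvC elements j := by
  intro j
  induction j with
  | zero =>
    intro _
    rw [pvS, pvC]
    simp [pvCnt0]
  | succ j ih =>
    intro hj
    rw [pvSSucc, pvCSucc, ih (by omega), pvCntSucc n_nodes elements j (by omega)]

lemma pvAdictEq (elements : List (List Int × List Int)) :
    pvAdict elements = (pvGen elements).foldl pvStepA PySem.Dict.empty :=
  pvFoldNested pvStepA elements PySem.Dict.empty

lemma pvAstepEq (elements : List (List Int × List Int)) :
    pvAstep (pvAdict elements) = pvStepA2 elements := by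
  funext st i
  simp only [pvAstep, pvStepA2, pvAdictEq]
  rfl

lemma pvBedgeListEq (n_nodes : Int) (elements : List (List Int × List Int)) :
    pvBedgeList n_nodes elements = pvF n_nodes elements := by
  have hbody : ∀ ia ib : Int, (if ia < ib then (ia, ib) else (ib, ia)) = (min ia ib, max ia ib) := by
    intro ia ib
    split <;> refine Prod.ext ?_ ?_ <;> simp <;> omega
  have h1 : pvBedgeList n_nodes elements
      = elements.foldl (fun s el =>
          (PySem.List.pyRange 0 (el.1.length : Int)).foldl (fun s a =>
            (PySem.List.pyRange (a + 1) (el.1.length : Int)).foldl (fun s b =>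
              if PySem.List.pyGetD el.1 a 0 = PySem.List.pyGetD el.1 b 0 then s
              else (fun s p => if 0 ≤ p.1 ∧ p.1 < n_nodes then s ++ [p] else s) s
                     (min (PySem.List.pyGetD el.1 a 0) (PySem.List.pyGetD el.1 b 0),
                      max (PySem.List.pyGetD el.1 a 0) (PySem.List.pyGetD el.1 b 0))) s) s) [] := by
    rw [pvBedgeList]
    apply PySem.List.foldl_congr_mem
    intro acc el _
    apply PySem.List.foldl_congr_mem
    intro acc2 a _
    apply PySem.List.foldl_congr_mem
    intro acc3 b _
    simp only []
    split
    · rfl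
    · rw [hbody]
  rw [h1, pvFoldNested (fun s p => if 0 ≤ p.1 ∧ p.1 < n_nodes then s ++ [p] else s) elements []]
  rw [PySem.List.foldl_append_ite (fun p : Int × Int => 0 ≤ p.1 ∧ p.1 < n_nodes) (fun p => p) (pvGen elements) []]
  rw [pvF]
  simp

lemma pvMainEq (n_nodes : Int) (elements : List (List Int × List Int)) :
    build_portrait n_nodes elements = build_portrait_alt n_nodes elements := by
  rw [build_portrait, build_portrait_alt, pvBedgeListEq, pvAstepEq]
  by_cases hn : n_nodes < 0
  · have hF : pvF n_nodes elements = [] := by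
      rw [pvF, List.filter_eq_nil_iff]
      intro p _
      simp only [decide_eq_true_eq]
      omega
    rw [hF, pvPyRangeMap 0 n_nodes, pvPyRangeMap 1 (n_nodes + 1)]
    have h0 : (n_nodes - 0).toNat = 0 := by omega
    have h1 : (n_nodes + 1 - 1).toNat = 0 := by omega
    rw [h0, h1]
    simp [PySem.Set.ofList, PySem.List.sorted2]
  · have hn' : 0 ≤ n_nodes := by omega
    have hcast : (n_nodes.toNat : Int) = n_nodes := Int.toNat_of_nonneg hn'
    rw [pvPyRangeMap 0 n_nodes, pvPyRangeMap 1 (n_nodes + 1), PySem.List.pyRepeat_singleton]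
    have h0 : (n_nodes - 0).toNat = n_nodes.toNat := by omega
    have h1 : (n_nodes + 1 - 1).toNat = n_nodes.toNat := by omega
    have h2 : (n_nodes + 1).toNat = n_nodes.toNat + 1 := by omega
    rw [h0, h1, h2, pvA2 elements n_nodes.toNat n_nodes.toNat (le_refl _), pvEdgesEq n_nodes elements]
    have hscat : (pvLcat n_nodes elements).foldl pvBscatStep (List.replicate (n_nodes.toNat + 1) 0)
        = (List.range (n_nodes.toNat + 1)).map (pvCnt n_nodes elements) := by
      obtain ⟨hl, hg⟩ := pvScatter (pvLcat n_nodes elements) (List.replicate (n_nodes.toNat + 1) 0)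
        (by
          intro p hp
          have hm := (pvMemLcat n_nodes elements p).mp hp
          rw [pvF, List.mem_filter] at hm
          have hmm := hm.2
          simp only [decide_eq_true_eq] at hmm
          simp only [List.length_replicate]
          omega)
      apply List.ext_getElem (by rw [hl]; simp)
      intro j hj1 hj2
      have hjlt : j < (List.replicate (n_nodes.toNat + 1) (0 : Int)).length := by
        rw [hl] at hj1; exact hj1
      have := hg j hjlt
      rw [List.getD_eq_getElem _ _ hj1, List.getD_eq_getElem _ _ hjlt] at this
      rw [this]
      simp [pvCnt]
    rw [hscat, pvPrefix (pvCnt n_nodes elements) n_nodes.toNat n_nodes.toNat (le_refl _)]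
    refine Prod.ext ?_ ?_
    · simp only []
      apply List.map_congr_left
      intro j hj
      rw [List.mem_range] at hj
      rw [if_pos (by omega), if_pos (by omega), pvSC n_nodes elements hn' j (by omega)]
    · simp only []
      rw [pvLcat, List.map_flatMap, pvPyRangeMap 0 n_nodes, h0, List.flatMap_map]
      congr 1
      funext t
      simp [List.map_map, Function.comp_def]

theorem build_portrait_spec : Claim_equal_build_portrait := by
  intro n_nodes elements _
  show build_portrait n_nodes elements = build_portrait_alt n_nodes elements
  exact pvMainEq n_nodes elements
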